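-- pv_equiv track=rewrite | github.com/soyukke/lean-unsolved | scripts/collatz_entropy_log43_theory.py | syracuse_preimages
-- ===== SOURCE A (Python) =====
-- def syracuse_preimages(x, max_val=10**12):
--     """Syracuse写像 S: odd -> odd の逆像
--     S(n) = (3n+1) / 2^{v_2(3n+1)} for odd n
--     逆像: S(y) = x となる奇数 y
--     つまり (3y+1) / 2^k = x for some k >= 1
--     => 3y + 1 = x * 2^k
--     => y = (x * 2^k - 1) / 3
--     y が正の奇数で y != x*2^k のとき"""
--     pre = []
--     for k in range(1, 60):  # 2^60 まで
--         val = x * (2**k) - 1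
--         if val % 3 == 0:
--             y = val // 3
--             if y > 0 and y % 2 == 1 and y <= max_val:
--                 # v_2(3y+1) = k であることを確認
--                 check = 3 * y + 1
--                 v = 0
--                 while check % 2 == 0:
--                     check >>= 1
--                     v += 1
--                 if v == k:
--                     pre.append(y)
--     return pre
-- ===== SOURCE B (Python) =====
-- def syracuse_preimages(x, max_val=10**12):
--     # Since 3y+1 = x*2^k exactly, v2(3y+1) = k iff x is odd: a single
--     # parity guard replaces A's per-iteration 2-adic valuation loop.
--     if x % 2 == 0:
--         return []
--     pre = []
--     for k in range(1, 60):
--         val = x * (2 ** k) - 1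
--         if val % 3 == 0:
--             y = val // 3
--             if y > 0 and y % 2 == 1 and y <= max_val:
--                 pre.append(y)
--     return pre
-- ===== Notes on version B (the rewrite author's own statement) =====
-- stated objective: simpler
-- what changed: B replaces A's per-iteration inner while-loop computing the 2-adic valuation of 3y+1 with a single up-front parity guard on x (since 3y+1 = x*2^k, v2(3y+1) = k iff x is odd), leaving one plain filter loop.
import Mathlib
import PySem

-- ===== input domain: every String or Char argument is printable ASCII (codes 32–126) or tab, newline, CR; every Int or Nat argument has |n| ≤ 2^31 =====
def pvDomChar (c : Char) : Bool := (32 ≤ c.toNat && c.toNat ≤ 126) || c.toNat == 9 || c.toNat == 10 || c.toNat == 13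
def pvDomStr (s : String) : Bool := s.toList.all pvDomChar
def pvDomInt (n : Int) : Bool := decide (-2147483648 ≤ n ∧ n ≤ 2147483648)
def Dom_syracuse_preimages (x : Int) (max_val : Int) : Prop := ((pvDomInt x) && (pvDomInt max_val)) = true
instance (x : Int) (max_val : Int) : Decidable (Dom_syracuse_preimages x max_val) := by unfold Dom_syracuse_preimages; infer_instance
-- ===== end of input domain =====

-- B drops A's inner 2-adic-valuation while-loop in favour of one up-front parity
-- guard on x (since 3y+1 = x*2^k exactly, v2(3y+1) = k iff x is odd): simpler.

-- ===== PORT A =====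
-- The Python inner 'while check % 2 == 0' loop, with fuel 128: the loop is only
-- reached with check = 3*y+1 > 0, and on Dom (|x| ≤ 2^31, k < 60) check < 2^92,
-- so its 2-adic valuation is < 92 < 128 and the fuel is never exhausted: exact.
def pvV2Loop : Nat → Int → Int → Int
  | 0, _, v => v
  | f+1, c, v =>
    if PySem.Int.mod c 2 = 0 then pvV2Loop f (PySem.Int.floordiv c 2) (v + 1) else v

def syracuse_preimages (x : Int) (max_val : Int) : List Int :=
  (PySem.List.pyRange 1 60 1).foldl (fun pre k =>
    -- 2**k with 1 ≤ k, so k.toNat is exact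
    let val := x * 2 ^ k.toNat - 1
    if PySem.Int.mod val 3 = 0 then
      let y := PySem.Int.floordiv val 3
      if y > 0 ∧ PySem.Int.mod y 2 = 1 ∧ y ≤ max_val then
        let check := 3 * y + 1
        let v := pvV2Loop 128 check 0
        if v = k then pre ++ [y] else pre
      else pre
    else pre) []

-- ===== PORT B =====
def syracuse_preimages_alt (x : Int) (max_val : Int) : List Int :=
  if PySem.Int.mod x 2 = 0 then []
  else
    (PySem.List.pyRange 1 60 1).foldl (fun pre k =>
      let val := x * 2 ^ k.toNat - 1
      if PySem.Int.mod val 3 = 0 then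
        let y := PySem.Int.floordiv val 3
        if y > 0 ∧ PySem.Int.mod y 2 = 1 ∧ y ≤ max_val then pre ++ [y] else pre
      else pre) []

-- ===== PRECONDITION & SPEC =====
def Spec_syracuse_preimages (x : Int) (max_val : Int) (out : List Int) : Prop := out = syracuse_preimages_alt x max_val
instance (x : Int) (max_val : Int) (out : List Int) : Decidable (Spec_syracuse_preimages x max_val out) := by unfold Spec_syracuse_preimages; infer_instance

-- ===== CLAIM (what is proved, stated in full; the proofs are below) =====
def Claim_equal_syracuse_preimages : Prop := ∀ (x : Int) (max_val : Int), Dom_syracuse_preimages x max_val → Spec_syracuse_preimages x max_val (syracuse_preimages x max_val)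

-- ===== LEMMAS AND PROOFS =====

-- the valuation loop never decreases its accumulator
theorem pvV2Loop_le (f : Nat) : ∀ (c v : Int), v ≤ pvV2Loop f c v := by
  induction f with
  | zero => intro c v; simp [pvV2Loop]
  | succ f ih =>
    intro c v
    simp only [pvV2Loop]
    split
    · exact le_trans (by omega) (ih _ (v + 1))
    · exact le_refl v

-- with an odd base, the loop strips exactly the j factors of 2
theorem pvV2Loop_odd_pow (j : Nat) : ∀ (f : Nat) (x v : Int), j + 1 ≤ f →
    PySem.Int.mod x 2 = 1 → pvV2Loop f (x * 2 ^ j) v = v + (j : Int) := by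
  induction j with
  | zero =>
    intro f x v hf hx
    obtain ⟨f', rfl⟩ : ∃ f', f = f' + 1 := ⟨f - 1, by omega⟩
    have hnd : ¬ PySem.Int.mod x 2 = 0 := by omega
    have h1 : x * 2 ^ 0 = x := by ring
    simp only [pvV2Loop, h1]
    rw [if_neg hnd]
    simp
  | succ j ih =>
    intro f x v hf hx
    obtain ⟨f', rfl⟩ : ∃ f', f = f' + 1 := ⟨f - 1, by omega⟩
    have hdvd : (2 : Int) ∣ x * 2 ^ (j + 1) := ⟨x * 2 ^ j, by ring⟩
    have hm : PySem.Int.mod (x * 2 ^ (j + 1)) 2 = 0 :=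
      (PySem.Int.mod_eq_zero_iff_dvd _ _).2 hdvd
    have hfd : PySem.Int.floordiv (x * 2 ^ (j + 1)) 2 = x * 2 ^ j := by
      rw [PySem.Int.floordiv_eq_ediv_of_pos (by norm_num)]
      have : x * 2 ^ (j + 1) = (x * 2 ^ j) * 2 := by ring
      rw [this, Int.mul_ediv_cancel _ (by norm_num)]
    simp only [pvV2Loop, hm, hfd, if_true]
    rw [ih f' x (v + 1) (by omega) hx]
    push_cast; ring

-- if 2^j divides c, the loop's result is at least v + j
theorem pvV2Loop_ge (j : Nat) : ∀ (f : Nat) (c v : Int), j ≤ f →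
    (2 : Int) ^ j ∣ c → v + (j : Int) ≤ pvV2Loop f c v := by
  induction j with
  | zero => intro f c v _ _; simpa using pvV2Loop_le f c v
  | succ j ih =>
    intro f c v hf hdvd
    obtain ⟨f', rfl⟩ : ∃ f', f = f' + 1 := ⟨f - 1, by omega⟩
    obtain ⟨c', rfl⟩ : ∃ c', c = 2 * c' := by
      obtain ⟨d, hd⟩ := hdvd
      exact ⟨2 ^ j * d, by rw [hd]; ring⟩
    have hm : PySem.Int.mod (2 * c') 2 = 0 :=
      (PySem.Int.mod_eq_zero_iff_dvd _ _).2 ⟨c', rfl⟩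
    have hfd : PySem.Int.floordiv (2 * c') 2 = c' := by
      rw [PySem.Int.floordiv_eq_ediv_of_pos (by norm_num)]
      rw [Int.mul_ediv_cancel_left _ (by norm_num)]
    simp only [pvV2Loop, hm, hfd, if_true]
    have hdvd' : (2 : Int) ^ j ∣ c' := by
      obtain ⟨d, hd⟩ := hdvd
      refine ⟨d, ?_⟩
      have : (2 : Int) * c' = 2 * (2 ^ j * d) := by rw [hd]; ring
      omega
    have := ih f' c' (v + 1) (by omega) hdvd'
    omega

-- inside the guards, 3*y+1 = x * 2^(k.toNat)
theorem check_eq (x : Int) (k : Int)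
    (h3 : PySem.Int.mod (x * 2 ^ k.toNat - 1) 3 = 0) :
    3 * PySem.Int.floordiv (x * 2 ^ k.toNat - 1) 3 + 1 = x * 2 ^ k.toNat := by
  have := PySem.Int.floordiv_mul_add_mod (x * 2 ^ k.toNat - 1) 3
  omega

theorem syracuse_odd (x max_val : Int) (hx : PySem.Int.mod x 2 = 1) :
    syracuse_preimages x max_val = syracuse_preimages_alt x max_val := by
  unfold syracuse_preimages syracuse_preimages_alt
  rw [if_neg (by rw [hx]; norm_num)]
  apply PySem.List.foldl_congr_mem
  intro pre k hk
  have hk' := (PySem.List.mem_pyRange_one.1 hk)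
  simp only
  split
  · next h3 =>
    split
    · next hg =>
      have hchk := check_eq x k h3
      have hv : pvV2Loop 128 (3 * PySem.Int.floordiv (x * 2 ^ k.toNat - 1) 3 + 1) 0 = k := by
        rw [hchk, pvV2Loop_odd_pow k.toNat 128 x 0 (by omega) hx]
        omega
      rw [if_pos hv]
    · rfl
  · rfl

theorem syracuse_even (x max_val : Int) (hx : PySem.Int.mod x 2 = 0) :
    syracuse_preimages x max_val = syracuse_preimages_alt x max_val := by
  unfold syracuse_preimages syracuse_preimages_alt
  rw [if_pos hx]
  rw [PySem.List.foldl_congr_mem (g := fun (pre : List Int) (_ : Int) => pre)]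
  · simp
  · intro pre k hk
    have hk' := (PySem.List.mem_pyRange_one.1 hk)
    simp only
    split
    · next h3 =>
      split
      · next hg =>
        have hchk := check_eq x k h3
        have hdvd : (2 : Int) ^ (k.toNat + 1) ∣ x * 2 ^ k.toNat := by
          obtain ⟨x', hx'⟩ := (PySem.Int.mod_eq_zero_iff_dvd x 2).1 hx
          exact ⟨x', by rw [hx']; ring⟩
        have hge := pvV2Loop_ge (k.toNat + 1) 128
          (3 * PySem.Int.floordiv (x * 2 ^ k.toNat - 1) 3 + 1) 0 (by omega)
          (by rw [hchk]; exact hdvd)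
        have hne : pvV2Loop 128 (3 * PySem.Int.floordiv (x * 2 ^ k.toNat - 1) 3 + 1) 0 ≠ k := by
          have : ((k.toNat + 1 : Nat) : Int) = k + 1 := by omega
          omega
        rw [if_neg hne]
      · rfl
    · rfl

-- ===== VERDICT (by name: the statement is the Claim_ definition above) =====
theorem syracuse_preimages_spec : Claim_equal_syracuse_preimages := by
  intro x max_val _
  unfold Spec_syracuse_preimages
  rcases PySem.Int.mod_two_eq x with h | h
  · exact syracuse_even x max_val h
  · exact syracuse_odd x max_val h
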